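-- pv_equiv track=rewrite | github.com/aanasakhtar/DSA-Project | circuit_sim/main.py | near_DIVISION_multiple
-- ===== SOURCE A (Python) =====
-- def near_DIVISION_multiple(DIVISION, number):
--     """
--     This function returns the nearest block clicked in the grid for the wires to be made.
--     """
--     a = number
--     if a%DIVISION >= DIVISION//2:
--         while a%DIVISION != 0:
--             a+=1
--         return a
--     else:
--         while a%DIVISION != 0:
--             a-=1
--         return a
-- ===== SOURCE B (Python) =====
-- def near_DIVISION_multiple(DIVISION, number):
--     if number % DIVISION >= DIVISION // 2:
--         return number + (-number) % DIVISION
--     return number - number % DIVISION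
-- ===== Notes on version B (the rewrite author's own statement) =====
-- stated objective: faster
-- what changed: replaces the two unit-step while loops (walking up/down until a multiple is hit) with closed-form modulo arithmetic
-- outside the precondition, e.g. on near_DIVISION_multiple(-4, 1): A returns 0, B returns 4; on near_DIVISION_multiple(0, 5): A raises ZeroDivisionError, B raises ZeroDivisionError
import Mathlib
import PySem

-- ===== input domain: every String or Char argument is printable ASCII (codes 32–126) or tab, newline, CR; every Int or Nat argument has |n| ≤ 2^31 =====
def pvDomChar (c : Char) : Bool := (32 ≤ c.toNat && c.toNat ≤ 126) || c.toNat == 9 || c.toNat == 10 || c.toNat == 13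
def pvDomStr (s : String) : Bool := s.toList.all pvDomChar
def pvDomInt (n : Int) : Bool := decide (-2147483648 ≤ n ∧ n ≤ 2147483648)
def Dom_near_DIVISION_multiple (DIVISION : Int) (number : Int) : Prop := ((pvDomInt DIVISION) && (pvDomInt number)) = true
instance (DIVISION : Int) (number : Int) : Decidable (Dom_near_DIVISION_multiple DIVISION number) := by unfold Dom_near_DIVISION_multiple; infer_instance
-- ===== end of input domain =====

-- B replaces A's two unit-step while loops with closed-form modulo arithmetic (O(DIVISION) → O(1)).

-- ===== PORT A =====
-- while a % DIVISION != 0: a += 1   (fuel DIVISION.natAbs suffices: for DIVISION > 0 the loop takes < DIVISION steps)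
def pvUpLoop : Nat → Int → Int → Int
  | 0, _, a => a
  | n + 1, d, a => if PySem.Int.mod a d ≠ 0 then pvUpLoop n d (a + 1) else a

-- while a % DIVISION != 0: a -= 1
def pvDownLoop : Nat → Int → Int → Int
  | 0, _, a => a
  | n + 1, d, a => if PySem.Int.mod a d ≠ 0 then pvDownLoop n d (a - 1) else a

def near_DIVISION_multiple (DIVISION : Int) (number : Int) : Int :=
  if PySem.Int.mod number DIVISION ≥ PySem.Int.floordiv DIVISION 2 then
    pvUpLoop DIVISION.natAbs DIVISION number
  else
    pvDownLoop DIVISION.natAbs DIVISION number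

-- ===== PORT B =====
def near_DIVISION_multiple_alt (DIVISION : Int) (number : Int) : Int :=
  if PySem.Int.mod number DIVISION ≥ PySem.Int.floordiv DIVISION 2 then
    number + PySem.Int.mod (-number) DIVISION
  else
    number - PySem.Int.mod number DIVISION

-- ===== PRECONDITION & SPEC =====
-- Pre_ restricts to positive DIVISION, the function's natural grid-spacing domain: DIVISION = 0
-- makes A raise ZeroDivisionError, and for DIVISION < 0 (outside any grid use) A's downward snap is
-- an artefact of Python's divisor-sign modulo that B does not reproduce.
def Pre_near_DIVISION_multiple (DIVISION : Int) (number : Int) : Prop := 0 < DIVISION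
instance (DIVISION : Int) (number : Int) : Decidable (Pre_near_DIVISION_multiple DIVISION number) := by unfold Pre_near_DIVISION_multiple; infer_instance
def pvWitness_near_DIVISION_multiple : Int × Int := (20, 33)

def Spec_near_DIVISION_multiple (DIVISION : Int) (number : Int) (out : Int) : Prop := out = near_DIVISION_multiple_alt DIVISION number
instance (DIVISION : Int) (number : Int) (out : Int) : Decidable (Spec_near_DIVISION_multiple DIVISION number out) := by unfold Spec_near_DIVISION_multiple; infer_instance

-- ===== CLAIM (what is proved, stated in full; the proofs are below) =====
def Claim_equal_near_DIVISION_multiple : Prop := ∀ (DIVISION : Int) (number : Int), Dom_near_DIVISION_multiple DIVISION number → Pre_near_DIVISION_multiple DIVISION number → Spec_near_DIVISION_multiple DIVISION number (near_DIVISION_multiple DIVISION number)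

-- ===== LEMMAS AND PROOFS =====

-- stepping by one past a non-multiple: (a+1) % d in terms of a % d
theorem pv_emod_succ (d a : Int) (hd : 0 < d) :
    (a + 1) % d = if a % d + 1 = d then 0 else a % d + 1 := by
  have h0 := Int.emod_nonneg a (ne_of_gt hd)
  have h1 := Int.emod_lt_of_pos a hd
  by_cases hone : d = 1
  · subst hone; simp
  · have hd2 : 2 ≤ d := by omega
    have h1d : (1 : Int) % d = 1 := Int.emod_eq_of_lt (by omega) (by omega)
    rw [Int.add_emod, h1d]
    split_ifs with h
    · rw [h]; simp
    · exact Int.emod_eq_of_lt (by omega) (by omega)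

theorem pv_emod_pred (d a : Int) (hd : 0 < d) (h : a % d ≠ 0) :
    (a - 1) % d = a % d - 1 := by
  have h0 := Int.emod_nonneg a (ne_of_gt hd)
  have h1 := Int.emod_lt_of_pos a hd
  by_cases hone : d = 1
  · subst hone; simp at h0 h1; omega
  · have h1d : (1 : Int) % d = 1 := Int.emod_eq_of_lt (by omega) (by omega)
    rw [Int.sub_emod, h1d]
    exact Int.emod_eq_of_lt (by omega) (by omega)

theorem pv_neg_emod (d a : Int) (hd : 0 < d) :
    (-a) % d = if a % d = 0 then 0 else d - a % d := by
  have h0 := Int.emod_nonneg a (ne_of_gt hd)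
  have h1 := Int.emod_lt_of_pos a hd
  split_ifs with h
  · have : d ∣ a := Int.dvd_of_emod_eq_zero h
    exact Int.emod_eq_zero_of_dvd (Dvd.dvd.neg_right this)
  · have key : -a = (d - a % d) + d * (-(a / d) - 1) := by
      linear_combination Int.emod_add_mul_ediv a d
    rw [key, Int.add_mul_emod_self_left]
    exact Int.emod_eq_of_lt (by omega) (by omega)

theorem pv_upLoop_eq (d : Int) (hd : 0 < d) :
    ∀ (fuel : Nat) (a : Int), (a % d = 0 ∨ d - a % d ≤ (fuel : Int)) →
      pvUpLoop fuel d a = a + (if a % d = 0 then 0 else d - a % d) := by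
  intro fuel
  induction fuel with
  | zero =>
    intro a h
    have h0 := Int.emod_nonneg a (ne_of_gt hd)
    have h1 := Int.emod_lt_of_pos a hd
    have hz : a % d = 0 := by omega
    simp [pvUpLoop, hz]
  | succ n ih =>
    intro a h
    have h0 := Int.emod_nonneg a (ne_of_gt hd)
    have h1 := Int.emod_lt_of_pos a hd
    rw [pvUpLoop, PySem.Int.mod_eq_emod_of_pos hd]
    split_ifs with hne
    · have hsucc := pv_emod_succ d a hd
      have hb : d - a % d ≤ (n : Int) + 1 := by
        rcases h with h | h
        · exact absurd h hne
        · exact_mod_cast h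
      by_cases hend : a % d + 1 = d
      · rw [ih (a + 1) (Or.inl (by rw [hsucc, if_pos hend]))]
        rw [hsucc, if_pos hend]
        simp
        omega
      · rw [ih (a + 1) (Or.inr (by rw [hsucc, if_neg hend]; omega))]
        rw [hsucc, if_neg hend, if_neg (by omega : ¬ (a % d + 1 = 0))]
        omega
    · omega
    · omega

theorem pv_downLoop_eq (d : Int) (hd : 0 < d) :
    ∀ (fuel : Nat) (a : Int), a % d ≤ (fuel : Int) →
      pvDownLoop fuel d a = a - a % d := by
  intro fuel
  induction fuel with
  | zero =>
    intro a h
    have h0 := Int.emod_nonneg a (ne_of_gt hd)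
    have hz : a % d = 0 := by omega
    simp [pvDownLoop, hz]
  | succ n ih =>
    intro a h
    have h0 := Int.emod_nonneg a (ne_of_gt hd)
    rw [pvDownLoop, PySem.Int.mod_eq_emod_of_pos hd]
    split_ifs with hne
    · have hpred := pv_emod_pred d a hd hne
      rw [ih (a - 1) (by rw [hpred]; omega)]
      omega
    · simp at hne; omega

-- ===== VERDICT (by name: the statement is the Claim_ definition above) =====
theorem near_DIVISION_multiple_spec : Claim_equal_near_DIVISION_multiple := by
  intro d n _ hpre
  unfold Spec_near_DIVISION_multiple near_DIVISION_multiple near_DIVISION_multiple_alt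
  have hd : (0 : Int) < d := hpre
  have h0 := Int.emod_nonneg n (ne_of_gt hd)
  have h1 := Int.emod_lt_of_pos n hd
  have hfuel : (d.natAbs : Int) = d := Int.natAbs_of_nonneg (le_of_lt hd)
  rw [PySem.Int.mod_eq_emod_of_pos hd, PySem.Int.mod_eq_emod_of_pos hd]
  split_ifs with hc
  · rw [pv_upLoop_eq d hd d.natAbs n (by rw [hfuel]; omega),
        pv_neg_emod d n hd]
  · rw [pv_downLoop_eq d hd d.natAbs n (by rw [hfuel]; omega)]
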